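-- pv_equiv track=rewrite | github.com/rodrigogiraoserrao/Advent-of-Code | 2025/07.py | part2
-- ===== SOURCE A (Python) =====
-- from collections import Counter
--
-- def part2(inp: str) -> str | int | None:
--     splitters = []
--     header, *splitter_rows = inp.splitlines()
--     for row in splitter_rows:
--         splitter_locations = {idx for idx, cell in enumerate(row) if cell == "^"}
--         if splitter_locations:
--             splitters.append(splitter_locations)
--
--     width = len(header)
--     beams = Counter()
--     beams[header.find("S")] = 1
--     for row in splitters:
--         new_beams = Counter()
--         for hit in beams.keys() & row:
--             if hit >= 1:
--                 new_beams[hit - 1] += beams[hit]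
--             if hit <= width - 2:
--                 new_beams[hit + 1] += beams[hit]
--         for miss in beams.keys() - row:
--             new_beams[miss] += beams[miss]
--         beams = new_beams
--     return beams.total()
-- ===== SOURCE B (Python) =====
-- def part2(inp: str) -> "str | int | None":
--     # Backward DP: val[p] = number of final beams produced by ONE beam entering
--     # column p above the remaining rows; answer is val at the start column.
--     header, *rows = inp.splitlines()
--     width = len(header)
--     val = [1] * width
--     for row in reversed(rows):
--         val = [
--             (val[p - 1] if p >= 1 else 0) + (val[p + 1] if p <= width - 2 else 0)
--             if p < len(row) and row[p] == "^"
--             else val[p]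
--             for p in range(width)
--         ]
--     start = header.find("S")
--     # a find() miss puts the single beam at column -1, which never meets a splitter
--     return val[start] if start >= 0 else 1
-- ===== Notes on version B (the rewrite author's own statement) =====
-- stated objective: alternative
-- what changed: B replaces A's forward propagation of a beam-count mapping through the splitter rows by a backward dynamic program: it folds over the rows in reverse computing, for every column, the number of final beams one beam entering that column would produce, and then looks that table up at the start column (a missed find leaves the lone beam left of the grid, value 1).
import Mathlib
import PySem

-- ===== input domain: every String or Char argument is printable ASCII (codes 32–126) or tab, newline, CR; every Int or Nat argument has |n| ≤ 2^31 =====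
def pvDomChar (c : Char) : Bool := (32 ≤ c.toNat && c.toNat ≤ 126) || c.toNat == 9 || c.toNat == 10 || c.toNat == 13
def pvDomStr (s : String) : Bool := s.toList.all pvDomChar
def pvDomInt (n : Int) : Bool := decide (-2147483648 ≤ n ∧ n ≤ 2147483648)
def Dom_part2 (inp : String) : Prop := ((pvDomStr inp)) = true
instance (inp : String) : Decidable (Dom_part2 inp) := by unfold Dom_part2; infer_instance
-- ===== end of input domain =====

-- B replaces A's forward propagation of beam counts by a backward dynamic program over the
-- rows (value of one beam per column, looked up at the start column); equal results proved
-- for every non-empty input (objective: alternative algorithm, similar cost).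


-- ===== PORT A =====
-- {idx for idx, cell in enumerate(row) if cell == "^"}
def locsOfA (row : String) : PySem.Set Int :=
  PySem.Set.ofList (((PySem.List.enumerate row.toList 0).filter (fun p => p.2 == '^')).map (·.1))

def part2 (inp : String) : Int :=
  match PySem.Str.splitlines inp with
  | [] => 0   -- Python raises ValueError here (unpacking); excluded by Pre_part2
  | header :: splitterRows =>
    let splitters : List (PySem.Set Int) :=
      splitterRows.foldl (fun acc row =>
        let locs := locsOfA row
        if locs ≠ [] then acc ++ [locs] else acc) []
    let width : Int := PySem.Str.len header
    let beams0 : PySem.Dict Int Int := PySem.Dict.empty.insert (PySem.Str.find header "S") 1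
    let final := splitters.foldl (fun beams row =>
      let nb := (PySem.Set.inter beams.keys row).foldl (fun nb hit =>
          let nb := if 1 ≤ hit then nb.modify (hit - 1) 0 (· + beams.getD hit 0) else nb
          if hit ≤ width - 2 then nb.modify (hit + 1) 0 (· + beams.getD hit 0) else nb)
        PySem.Dict.empty
      (PySem.Set.diff beams.keys row).foldl (fun nb miss =>
        nb.modify miss 0 (· + beams.getD miss 0)) nb) beams0
    final.values.sum

-- ===== PORT B =====
def part2_alt (inp : String) : Int :=
  match PySem.Str.splitlines inp with
  | [] => 0   -- Python raises ValueError here (unpacking); excluded by Pre_part2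
  | header :: rows =>
    let width : Int := PySem.Str.len header
    let val := rows.reverse.foldl (fun val row =>
      (PySem.List.pyRange 0 width 1).map (fun p =>
        if p < PySem.Str.len row ∧ PySem.Str.pyGet? row p = some '^' then
          (if 1 ≤ p then PySem.List.pyGetD val (p - 1) 0 else 0) +
          (if p ≤ width - 2 then PySem.List.pyGetD val (p + 1) 0 else 0)
        else PySem.List.pyGetD val p 0)) (List.replicate width.toNat 1)
    let start := PySem.Str.find header "S"
    if 0 ≤ start then PySem.List.pyGetD val start 0 else 1

-- ===== PRECONDITION & SPEC =====
-- Pre_ excludes only the empty string: there inp.splitlines() is empty and the tuple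
-- unpacking of the header line raises ValueError in A (and in B alike).
def Pre_part2 (inp : String) : Prop := inp ≠ ""
instance (inp : String) : Decidable (Pre_part2 inp) := by unfold Pre_part2; infer_instance
def pvWitness_part2 : String := "S..\n.^.\n^.^"

def Spec_part2 (inp : String) (out : Int) : Prop := out = part2_alt inp
instance (inp : String) (out : Int) : Decidable (Spec_part2 inp out) := by unfold Spec_part2; infer_instance

-- ===== CLAIM (what is proved, stated in full; the proofs are below) =====
def Claim_equal_part2 : Prop := ∀ (inp : String), Dom_part2 inp → Pre_part2 inp → Spec_part2 inp (part2 inp)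

-- ===== LEMMAS AND PROOFS =====

-- Proof-side names for the two per-row loop bodies (definitionally the ports' lambdas).
def pvStepA (w : Int) (beams : PySem.Dict Int Int) (row : PySem.Set Int) : PySem.Dict Int Int :=
  let nb := (PySem.Set.inter beams.keys row).foldl (fun nb hit =>
      let nb := if 1 ≤ hit then nb.modify (hit - 1) 0 (· + beams.getD hit 0) else nb
      if hit ≤ w - 2 then nb.modify (hit + 1) 0 (· + beams.getD hit 0) else nb)
    PySem.Dict.empty
  (PySem.Set.diff beams.keys row).foldl (fun nb miss =>
    nb.modify miss 0 (· + beams.getD miss 0)) nb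

def pvBstep (w : Int) (val : List Int) (row : String) : List Int :=
  (PySem.List.pyRange 0 w 1).map (fun p =>
    if p < PySem.Str.len row ∧ PySem.Str.pyGet? row p = some '^' then
      (if 1 ≤ p then PySem.List.pyGetD val (p - 1) 0 else 0) +
      (if p ≤ w - 2 then PySem.List.pyGetD val (p + 1) 0 else 0)
    else PySem.List.pyGetD val p 0)

def pvHit (row : String) (p : Int) : Bool :=
  decide (0 ≤ p ∧ p < PySem.Str.len row ∧ PySem.Str.pyGet? row p = some '^')

-- the value-of-one-beam function read off B's table: columns < 0 never meet a splitter
def pvW (val : List Int) (p : Int) : Int :=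
  if 0 ≤ p then PySem.List.pyGetD val p 0 else 1

-- how one splitter row transforms the one-beam value function
def pvSplit (w : Int) (f : Int → Int) (k : Int) : Int :=
  (if 1 ≤ k then f (k - 1) else 0) + (if k ≤ w - 2 then f (k + 1) else 0)

-- weighted total of a beam dict against a value function
def pvWsum (d : PySem.Dict Int Int) (f : Int → Int) : Int :=
  (d.keys.map (fun k => d.getD k 0 * f k)).sum

def pvTotal (d : PySem.Dict Int Int) : Int := d.values.sum

def pvApply (L : List (Int × Int)) (d : PySem.Dict Int Int) : PySem.Dict Int Int :=
  L.foldl (fun nb pc => nb.modify pc.1 0 (· + pc.2)) d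

-- invariant: beam positions are distinct and lie in {negative} ∪ [0, w)
def pvInv (w : Int) (d : PySem.Dict Int Int) : Prop :=
  d.keys.Nodup ∧ ∀ k ∈ d.keys, k < 0 ∨ (0 ≤ k ∧ k < w)

-- membership in A's splitter set = the direct character test
lemma contains_locsOfA (row : String) (q : Int) :
    PySem.Set.contains (locsOfA row) q = true ↔ pvHit row q = true := by
  unfold locsOfA pvHit
  rw [decide_eq_true_eq]
  simp only [PySem.Set.contains, List.contains_iff_mem, PySem.Set.mem_ofList, List.mem_map,
    List.mem_filter, PySem.List.mem_enumerate_iff]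
  constructor
  · rintro ⟨⟨a, c⟩, ⟨⟨k, hk, hek⟩, hc⟩, rfl⟩
    obtain ⟨rfl, rfl⟩ := Prod.mk.injEq .. ▸ hek
    simp only [beq_iff_eq] at hc
    refine ⟨by simp, by simpa using hk, ?_⟩
    have : PySem.Str.pyGet? row ((0:Int) + (k:Int)) = PySem.Str.pyGet? row (k : Int) := by ring_nf
    rw [this, PySem.Str.pyGet?_natCast]
    simp [List.getElem?_eq_getElem hk, hc]
  · rintro ⟨h0, hlt, hget⟩
    refine ⟨(q, '^'), ⟨⟨q.toNat, ?_, ?_⟩, by simp⟩, rfl⟩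
    · have := PySem.Str.pyGet?_natCast row q.toNat
      rw [show ((q.toNat : Nat) : Int) = q from Int.toNat_of_nonneg h0] at this
      rw [this] at hget
      exact (List.getElem?_eq_some_iff.mp hget).1
    · have := PySem.Str.pyGet?_natCast row q.toNat
      rw [show ((q.toNat : Nat) : Int) = q from Int.toNat_of_nonneg h0] at this
      rw [this] at hget
      obtain ⟨hk, hv⟩ := List.getElem?_eq_some_iff.mp hget
      simp [Int.toNat_of_nonneg h0, hv]

lemma keys_pvApply (L : List (Int × Int)) (d : PySem.Dict Int Int) :
    (pvApply L d).keys = PySem.Set.update d.keys (L.map (·.1)) :=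
  PySem.Dict.keys_foldl_modify_key L (·.1) 0 (fun _ pc => (· + pc.2)) d

lemma nodup_keys_pvApply (L : List (Int × Int)) (d : PySem.Dict Int Int)
    (h : d.keys.Nodup) : (pvApply L d).keys.Nodup :=
  PySem.Dict.nodup_keys_foldl_modify_key L (·.1) 0 (fun _ pc => (· + pc.2)) d h

lemma keys_pvApply_empty (L : List (Int × Int)) :
    (pvApply L PySem.Dict.empty).keys = PySem.Set.ofList (L.map (·.1)) := by
  rw [keys_pvApply]
  simp [PySem.Set.update_nil_left]

-- A's row loop is an accumulation fold over an additions list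
lemma stepA_eq (w : Int) (beams : PySem.Dict Int Int) (row : PySem.Set Int) :
    pvStepA w beams row =
      pvApply ((PySem.Set.inter beams.keys row).flatMap (fun h =>
          (if 1 ≤ h then [(h - 1, beams.getD h 0)] else []) ++
          (if h ≤ w - 2 then [(h + 1, beams.getD h 0)] else [])) ++
        (PySem.Set.diff beams.keys row).map (fun m => (m, beams.getD m 0)))
        PySem.Dict.empty := by
  unfold pvStepA pvApply
  rw [List.foldl_append, List.foldl_flatMap, List.foldl_map]
  have hin : List.foldl (fun nb hit =>
        let nb := if 1 ≤ hit then nb.modify (hit - 1) 0 (· + beams.getD hit 0) else nb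
        if hit ≤ w - 2 then nb.modify (hit + 1) 0 (· + beams.getD hit 0) else nb)
      PySem.Dict.empty (PySem.Set.inter beams.keys row) =
      List.foldl (fun acc x => List.foldl (fun nb pc => nb.modify pc.1 0 (· + pc.2)) acc
          ((if 1 ≤ x then [(x - 1, beams.getD x 0)] else []) ++
           (if x ≤ w - 2 then [(x + 1, beams.getD x 0)] else [])))
      PySem.Dict.empty (PySem.Set.inter beams.keys row) := by
    apply List.foldl_ext
    intro nb hit _
    split_ifs <;> simp
  show List.foldl _ (List.foldl _ PySem.Dict.empty _) _ = _
  rw [hin]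

-- updating one key of a Nodup sum
lemma sum_map_update (l : List Int) (hnd : l.Nodup) (g f : Int → Int) (p c : Int) (hp : p ∈ l) :
    (l.map (fun k => (if k = p then g k + c else g k) * f k)).sum
      = (l.map (fun k => g k * f k)).sum + c * f p := by
  induction l with
  | nil => cases hp
  | cons x xs ih =>
    rcases List.nodup_cons.mp hnd with ⟨hx, hxs⟩
    simp only [List.map_cons, List.sum_cons]
    by_cases hxp : x = p
    · subst hxp
      have hrest : xs.map (fun k => (if k = x then g k + c else g k) * f k)
          = xs.map (fun k => g k * f k) :=
        List.map_congr_left (fun k hk => by rw [if_neg (by rintro rfl; exact hx hk)])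
      rw [if_pos rfl, hrest]
      ring
    · have hp' : p ∈ xs := by
        rcases List.mem_cons.mp hp with h | h
        · exact absurd h.symm hxp
        · exact h
      rw [if_neg hxp, ih hxs hp']
      ring

lemma wsum_modify (d : PySem.Dict Int Int) (p c : Int) (f : Int → Int)
    (hnd : d.keys.Nodup) :
    pvWsum (d.modify p 0 (· + c)) f = pvWsum d f + c * f p := by
  have hkeys : (d.modify p 0 (· + c)).keys = PySem.Set.add d.keys p :=
    keys_pvApply [(p, c)] d
  unfold pvWsum
  rw [hkeys]
  by_cases hp : p ∈ d.keys
  · have hadd : PySem.Set.add d.keys p = d.keys := by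
      simp [PySem.Set.add, PySem.Set.contains, hp]
    rw [hadd]
    have hcongr : d.keys.map (fun k => (d.modify p 0 (· + c)).getD k 0 * f k)
        = d.keys.map (fun k => (if k = p then d.getD k 0 + c else d.getD k 0) * f k) := by
      apply List.map_congr_left
      intro k _
      rw [PySem.Dict.getD_modify]
      split_ifs with h
      · subst h; rfl
      · rfl
    rw [hcongr, sum_map_update d.keys hnd _ f p c hp]
  · have hadd : PySem.Set.add d.keys p = d.keys ++ [p] := by
      simp [PySem.Set.add, PySem.Set.contains, hp]
    rw [hadd, List.map_append, List.sum_append]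
    have hcongr : d.keys.map (fun k => (d.modify p 0 (· + c)).getD k 0 * f k)
        = d.keys.map (fun k => d.getD k 0 * f k) := by
      apply List.map_congr_left
      intro k hk
      rw [PySem.Dict.getD_modify_of_ne]
      rintro rfl; exact hp hk
    have hmiss : d.getD p 0 = 0 := by
      apply PySem.Dict.getD_of_not_contains
      rw [← Bool.not_eq_true, PySem.Dict.contains_iff_mem_keys]
      exact hp
    rw [hcongr]
    simp [PySem.Dict.getD_modify_self, hmiss]

lemma wsum_pvApply (L : List (Int × Int)) (d : PySem.Dict Int Int) (f : Int → Int)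
    (hnd : d.keys.Nodup) :
    pvWsum (pvApply L d) f = pvWsum d f + (L.map (fun pc => pc.2 * f pc.1)).sum := by
  induction L generalizing d with
  | nil => simp [pvApply]
  | cons pc L ih =>
    show pvWsum (pvApply L (d.modify pc.1 0 (· + pc.2))) f = _
    have hnd' : (d.modify pc.1 0 (· + pc.2)).keys.Nodup := nodup_keys_pvApply [pc] d hnd
    rw [ih _ hnd', wsum_modify d pc.1 pc.2 f hnd]
    simp only [List.map_cons, List.sum_cons]
    ring

lemma sum_map_flatMap_hits (w : Int) (d : PySem.Dict Int Int) (f : Int → Int) (l : List Int) :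
    ((l.flatMap (fun hh =>
        (if 1 ≤ hh then [(hh - 1, d.getD hh 0)] else []) ++
        (if hh ≤ w - 2 then [(hh + 1, d.getD hh 0)] else []))).map
      (fun pc => pc.2 * f pc.1)).sum
      = (l.map (fun k => d.getD k 0 * pvSplit w f k)).sum := by
  induction l with
  | nil => rfl
  | cons x xs ih =>
    simp only [List.flatMap_cons, List.map_append, List.sum_append, List.map_cons,
      List.sum_cons, ih]
    have hx : (((if 1 ≤ x then [(x - 1, d.getD x 0)] else []).map
          (fun pc => pc.2 * f pc.1)).sum) +
        (((if x ≤ w - 2 then [(x + 1, d.getD x 0)] else []).map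
          (fun pc => pc.2 * f pc.1)).sum) = d.getD x 0 * pvSplit w f x := by
      unfold pvSplit
      split_ifs <;> simp <;> ring
    rw [← hx]

lemma sum_filter_ite {α : Type} (p : α → Bool) (F G : α → Int) (l : List α) :
    ((l.filter p).map F).sum + ((l.filter (fun x => !p x)).map G).sum
      = (l.map (fun x => if p x then F x else G x)).sum := by
  induction l with
  | nil => rfl
  | cons x xs ih =>
    cases hpx : p x with
    | true => simp [hpx]; omega
    | false => simp [hpx]; omega

-- the adjoint identity: a forward step against f = the original dict against the split of f
lemma wsum_stepA (w : Int) (d : PySem.Dict Int Int) (locs : PySem.Set Int) (f : Int → Int) :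
    pvWsum (pvStepA w d locs) f
      = pvWsum d (fun k => if PySem.Set.contains locs k then pvSplit w f k else f k) := by
  rw [stepA_eq, wsum_pvApply _ _ f (by simp)]
  have hempty : pvWsum PySem.Dict.empty f = 0 := rfl
  rw [hempty, zero_add, List.map_append, List.sum_append]
  rw [sum_map_flatMap_hits w d f _]
  rw [List.map_map]
  have hdiff : ((PySem.Set.diff d.keys locs).map ((fun pc => pc.2 * f pc.1) ∘
      fun m => (m, d.getD m 0))) = (PySem.Set.diff d.keys locs).map (fun k => d.getD k 0 * f k) :=
    rfl
  rw [hdiff]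
  show ((d.keys.filter (fun x => PySem.Set.contains locs x)).map
        (fun k => d.getD k 0 * pvSplit w f k)).sum +
      ((d.keys.filter (fun x => !PySem.Set.contains locs x)).map
        (fun k => d.getD k 0 * f k)).sum = _
  rw [sum_filter_ite (fun x => PySem.Set.contains locs x) _ _ d.keys]
  unfold pvWsum
  apply congrArg
  apply List.map_congr_left
  intro k _
  cases h : PySem.Set.contains locs k with
  | true => simp only [h, if_true]
  | false => simp only [h, Bool.false_eq_true, if_false]

lemma wsum_congr (d : PySem.Dict Int Int) (f g : Int → Int)
    (h : ∀ k ∈ d.keys, f k = g k) : pvWsum d f = pvWsum d g := by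
  unfold pvWsum
  apply congrArg
  apply List.map_congr_left
  intro k hk
  rw [h k hk]

lemma total_eq_wsum (d : PySem.Dict Int Int) (hnd : d.keys.Nodup) :
    pvTotal d = pvWsum d (fun _ => 1) := by
  unfold pvTotal pvWsum
  rw [PySem.Dict.values_eq_map_keys d hnd 0]
  simp

-- the initial table is the constant-1 value function on the invariant's domain
lemma pvW_replicate (w k : Int) (hk : k < 0 ∨ (0 ≤ k ∧ k < w)) :
    pvW (List.replicate w.toNat 1) k = 1 := by
  rcases hk with hneg | ⟨h0, hw⟩
  · unfold pvW
    rw [if_neg (by omega)]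
  · unfold pvW
    rw [if_pos h0]
    rw [PySem.List.pyGetD_eq_getElem _ _ h0 (by simp; omega)]
    simp

-- B's row step computes exactly the split of the value function, on the invariant's domain
lemma pvW_bstep (w : Int) (val : List Int) (row : String) (k : Int)
    (hk : k < 0 ∨ (0 ≤ k ∧ k < w)) :
    pvW (pvBstep w val row) k
      = if PySem.Set.contains (locsOfA row) k then pvSplit w (pvW val) k else pvW val k := by
  rcases hk with hneg | ⟨h0, hw⟩
  · have hc : PySem.Set.contains (locsOfA row) k = false := by
      rw [← Bool.not_eq_true]
      intro h
      have := (contains_locsOfA row k).mp h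
      unfold pvHit at this
      rw [decide_eq_true_eq] at this
      omega
    rw [hc, if_neg (by simp)]
    unfold pvW
    rw [if_neg (by omega), if_neg (by omega)]
  · unfold pvBstep
    have hpW : pvW ((PySem.List.pyRange 0 w 1).map (fun p =>
        if p < PySem.Str.len row ∧ PySem.Str.pyGet? row p = some '^' then
          (if 1 ≤ p then PySem.List.pyGetD val (p - 1) 0 else 0) +
          (if p ≤ w - 2 then PySem.List.pyGetD val (p + 1) 0 else 0)
        else PySem.List.pyGetD val p 0)) k
        = (if k < PySem.Str.len row ∧ PySem.Str.pyGet? row k = some '^' then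
            (if 1 ≤ k then PySem.List.pyGetD val (k - 1) 0 else 0) +
            (if k ≤ w - 2 then PySem.List.pyGetD val (k + 1) 0 else 0)
          else PySem.List.pyGetD val k 0) := by
      unfold pvW
      rw [if_pos h0]
      exact PySem.List.pyGetD_map_pyRange_of_nonneg _ w k 0 h0 hw
    rw [hpW]
    by_cases hc : k < PySem.Str.len row ∧ PySem.Str.pyGet? row k = some '^'
    · have : PySem.Set.contains (locsOfA row) k = true := by
        rw [contains_locsOfA]
        unfold pvHit
        rw [decide_eq_true_eq]
        exact ⟨h0, hc.1, hc.2⟩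
      rw [if_pos hc, this, if_pos rfl]
      unfold pvSplit pvW
      split_ifs <;> omega
    · have : PySem.Set.contains (locsOfA row) k = false := by
        rw [← Bool.not_eq_true, contains_locsOfA]
        unfold pvHit
        rw [decide_eq_true_eq]
        rintro ⟨_, ha, hb⟩
        exact hc ⟨ha, hb⟩
      rw [if_neg hc, this, if_neg (by simp)]
      unfold pvW
      rw [if_pos h0]

-- the forward step preserves the position invariant
lemma inv_stepA (w : Int) (d : PySem.Dict Int Int) (row : String) (h : pvInv w d) :
    pvInv w (pvStepA w d (locsOfA row)) := by
  obtain ⟨hnd, hmem⟩ := h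
  rw [stepA_eq]
  refine ⟨nodup_keys_pvApply _ _ (by simp), ?_⟩
  intro k hk
  rw [keys_pvApply_empty, PySem.Set.mem_ofList] at hk
  rcases List.mem_map.mp hk with ⟨pc, hpc, rfl⟩
  rcases List.mem_append.mp hpc with hhit | hmiss
  · rcases List.mem_flatMap.mp hhit with ⟨hh, hhmem, hcontrib⟩
    have hhk : hh ∈ d.keys := by
      have : hh ∈ d.keys.filter (fun x => PySem.Set.contains (locsOfA row) x) := hhmem
      exact (List.mem_filter.mp this).1
    have hhc : PySem.Set.contains (locsOfA row) hh = true := by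
      have : hh ∈ d.keys.filter (fun x => PySem.Set.contains (locsOfA row) x) := hhmem
      exact (List.mem_filter.mp this).2
    have hh0 : 0 ≤ hh := by
      have := (contains_locsOfA row hh).mp hhc
      unfold pvHit at this
      rw [decide_eq_true_eq] at this
      exact this.1
    have hhw : hh < w := by
      rcases hmem hh hhk with h1 | ⟨_, h2⟩
      · omega
      · exact h2
    rcases List.mem_append.mp hcontrib with hl | hr
    · split_ifs at hl with hg
      · rcases List.mem_singleton.mp hl with rfl
        right; constructor <;> [omega; omega]
      · cases hl
    · split_ifs at hr with hg
      · rcases List.mem_singleton.mp hr with rfl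
        right; constructor <;> [omega; omega]
      · cases hr
  · rcases List.mem_map.mp hmiss with ⟨m, hm, rfl⟩
    have : m ∈ d.keys := by
      have : m ∈ d.keys.filter (fun x => !PySem.Set.contains (locsOfA row) x) := hm
      exact (List.mem_filter.mp this).1
    exact hmem m this

-- the main induction: forward total over A's splitters = weighted sum against B's backward table
lemma main_fold (w : Int) (rows : List String) (d : PySem.Dict Int Int) (h : pvInv w d) :
    pvTotal (((rows.filter (fun r => !(locsOfA r).isEmpty)).map locsOfA).foldl (pvStepA w) d)
      = pvWsum d (pvW (rows.reverse.foldl (pvBstep w) (List.replicate w.toNat 1))) := by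
  induction rows generalizing d with
  | nil =>
    simp only [List.filter_nil, List.map_nil, List.foldl_nil, List.reverse_nil]
    rw [total_eq_wsum d h.1]
    exact wsum_congr d _ _ (fun k hk => (pvW_replicate w k (h.2 k hk)).symm)
  | cons r rest ih =>
    have hrev : (r :: rest).reverse.foldl (pvBstep w) (List.replicate w.toNat 1)
        = pvBstep w (rest.reverse.foldl (pvBstep w) (List.replicate w.toNat 1)) r := by
      rw [List.reverse_cons, List.foldl_append]
      rfl
    rw [hrev]
    by_cases hr : locsOfA r = []
    · rw [List.filter_cons_of_neg (by simp [hr]), ih d h]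
      refine wsum_congr d _ _ (fun k hk => ?_)
      rw [pvW_bstep w _ r k (h.2 k hk)]
      have : PySem.Set.contains (locsOfA r) k = false := by
        simp [hr, PySem.Set.contains]
      rw [this, if_neg (by simp)]
    · rw [List.filter_cons_of_pos (by simp [hr]), List.map_cons, List.foldl_cons,
        ih _ (inv_stepA w d r h), wsum_stepA w d (locsOfA r) _]
      refine wsum_congr d _ _ (fun k hk => ?_)
      rw [pvW_bstep w _ r k (h.2 k hk)]

-- A's splitter-building loop is a filter-then-map
lemma splitters_eq (rows : List String) :
    rows.foldl (fun acc row =>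
        let locs := locsOfA row
        if locs ≠ [] then acc ++ [locs] else acc) [] =
      (rows.filter (fun r => !(locsOfA r).isEmpty)).map locsOfA := by
  rw [List.foldl_ext _ (fun acc row =>
      if (fun r => !(locsOfA r).isEmpty) row = true then acc ++ [locsOfA row] else acc) []
    (by intro a b _; by_cases h : locsOfA b = [] <;> simp [h])]
  simpa using PySem.List.foldl_append_if (fun r => !(locsOfA r).isEmpty) locsOfA rows []

lemma wsum_single (p : Int) (f : Int → Int) :
    pvWsum (PySem.Dict.empty.insert p (1:Int)) f = f p := by
  unfold pvWsum
  have hkeys : (PySem.Dict.empty.insert p (1:Int)).keys = [p] := rfl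
  rw [hkeys]
  simp [PySem.Dict.getD_insert_self]

-- the start column is either negative (find missed) or a valid column of the header
lemma start_inv (header : String) :
    PySem.Str.find header "S" < 0 ∨
      (0 ≤ PySem.Str.find header "S" ∧ PySem.Str.find header "S" < PySem.Str.len header) := by
  by_cases h0 : 0 ≤ PySem.Str.find header "S"
  · right
    refine ⟨h0, ?_⟩
    have hfind : PySem.Str.find header "S" = PySem.Chars.find header.toList "S".toList := by
      simp
    rw [hfind] at h0 ⊢
    obtain ⟨hpre, -⟩ := PySem.Chars.find_spec h0
    have hne : header.toList.drop (PySem.Chars.find header.toList "S".toList).toNat ≠ [] := by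
      intro hnil
      rw [hnil] at hpre
      exact absurd (List.prefix_nil.mp hpre) (by simp)
    have hlt : (PySem.Chars.find header.toList "S".toList).toNat < header.toList.length := by
      by_contra hge
      exact hne (List.drop_eq_nil_of_le (by omega))
    have : PySem.Str.len header = (header.toList.length : Int) := by simp
    rw [this]
    omega
  · left; omega

-- ===== VERDICT (by name: the statement is the Claim_ definition above) =====
theorem part2_spec : Claim_equal_part2 := by
  intro inp _ _
  unfold Spec_part2 part2 part2_alt
  cases hsplit : PySem.Str.splitlines inp with
  | nil => rfl
  | cons header rows =>
    simp only []
    rw [splitters_eq rows]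
    have hkeys1 : (PySem.Dict.empty.insert (PySem.Str.find header "S") (1:Int)).keys
        = [PySem.Str.find header "S"] := rfl
    have hinv : pvInv (PySem.Str.len header)
        (PySem.Dict.empty.insert (PySem.Str.find header "S") (1:Int)) := by
      constructor
      · rw [hkeys1]
        exact List.nodup_singleton _
      · intro k hk
        rw [hkeys1] at hk
        have hk' := List.mem_singleton.mp hk
        subst hk'
        exact start_inv header
    show pvTotal (List.foldl (pvStepA (PySem.Str.len header))
        (PySem.Dict.empty.insert (PySem.Str.find header "S") (1:Int))
        ((rows.filter (fun r => !(locsOfA r).isEmpty)).map locsOfA))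
      = pvW (rows.reverse.foldl (pvBstep (PySem.Str.len header))
          (List.replicate (PySem.Str.len header).toNat 1)) (PySem.Str.find header "S")
    rw [main_fold (PySem.Str.len header) rows _ hinv, wsum_single]
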